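-- pv_equiv track=rewrite | github.com/Gyuddi/Whole_thing | college/알고리즘/find_ticket.py | chanage_tickets
-- ===== SOURCE A (Python) =====
-- def chanage_tickets(tickets):
--     ticket_dic = {}
--     for [key,item] in tickets:
--         if key not in ticket_dic.keys():
--             ticket_dic[key] = []
--         ticket_dic[key].append(item)
--     for array_d in ticket_dic.values() :
--         array_d.sort()
--     return ticket_dic
-- ===== SOURCE B (Python) =====
-- def chanage_tickets(tickets):
--     keys = dict.fromkeys(key for key, item in tickets)
--     return {k: sorted(item for key, item in tickets if key == k) for k in keys}
-- ===== Notes on version B (the rewrite author's own statement) =====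
-- stated objective: alternative
-- what changed: B replaces A's mutable dict-of-lists accumulation with in-place per-group sorts by a two-phase functional pass: dedupe the keys in first-appearance order with dict.fromkeys, then build the result as a dict comprehension whose value for each key is sorted(filter of the items).
import Mathlib
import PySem

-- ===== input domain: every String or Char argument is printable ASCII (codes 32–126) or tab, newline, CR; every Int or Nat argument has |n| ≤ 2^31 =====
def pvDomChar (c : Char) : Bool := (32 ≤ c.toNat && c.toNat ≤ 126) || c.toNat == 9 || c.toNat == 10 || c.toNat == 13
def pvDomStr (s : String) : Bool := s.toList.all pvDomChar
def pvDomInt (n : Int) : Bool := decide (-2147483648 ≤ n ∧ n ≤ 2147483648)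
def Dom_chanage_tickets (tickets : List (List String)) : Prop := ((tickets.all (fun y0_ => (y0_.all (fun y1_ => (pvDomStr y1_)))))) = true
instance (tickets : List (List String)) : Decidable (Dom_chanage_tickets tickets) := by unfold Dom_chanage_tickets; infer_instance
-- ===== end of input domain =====

-- B is an alternative decomposition (dedupe keys, then one sorted comprehension per key)
-- of A's group-then-sort-each loop; equivalence of the returned association lists is proved
-- on inputs whose rows all have exactly two elements (elsewhere Python A raises).

-- ===== PORT A =====
-- rows that are not of the shape [key, item] make Python's unpacking raise ValueError;
-- Pre_ excludes them, the port leaves the dict unchanged on such a row.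
def chanage_tickets (tickets : List (List String)) : List (String × List String) :=
  let ticket_dic : PySem.Dict String (List String) :=
    tickets.foldl (fun d row =>
      match row with
      | [key, item] =>
          let d := if d.contains key then d else d.insert key []
          d.modify key [] (fun xs => xs ++ [item])
      | _ => d) PySem.Dict.empty
  -- second loop: each value list is sorted in place; keys and their order are unchanged
  ticket_dic.items.map (fun p => (p.1, PySem.List.sorted p.2 (fun x => x) false))

-- ===== PORT B =====
-- B-side helpers: the two generator expressions' unpacking of a row; exact for the
-- two-element rows Pre_ admits (Python's unpacking raises on any other row)
def pvRowKey (row : List String) : String := row.headD ""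
def pvRowItemIf (k : String) (row : List String) : Option String :=
  if row.headD "" == k then some (row.getD 1 "") else none
def chanage_tickets_alt (tickets : List (List String)) : List (String × List String) :=
  let keys : List String := PySem.List.dedup (tickets.map pvRowKey)
  keys.map (fun k =>
    (k, PySem.List.sorted (tickets.filterMap (pvRowItemIf k)) (fun x => x) false))

-- ===== PRECONDITION & SPEC =====
-- Pre_ excludes exactly the rows on which Python A raises ValueError (unpacking [key,item]
-- of a row whose length is not 2).
def Pre_chanage_tickets (tickets : List (List String)) : Prop :=
  ∀ r ∈ tickets, r.length = 2
instance (tickets : List (List String)) : Decidable (Pre_chanage_tickets tickets) := by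
  unfold Pre_chanage_tickets; infer_instance

def pvWitness_chanage_tickets : List (List String) :=
  [["a", "2"], ["b", "x"], ["a", "1"]]

def Spec_chanage_tickets (tickets : List (List String)) (out : List (String × List String)) : Prop := out = chanage_tickets_alt tickets
instance (tickets : List (List String)) (out : List (String × List String)) : Decidable (Spec_chanage_tickets tickets out) := by unfold Spec_chanage_tickets; infer_instance

-- ===== CLAIM (what is proved, stated in full; the proofs are below) =====
def Claim_equal_chanage_tickets : Prop := ∀ (tickets : List (List String)), Dom_chanage_tickets tickets → Pre_chanage_tickets tickets → Spec_chanage_tickets tickets (chanage_tickets tickets)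

-- ===== LEMMAS AND PROOFS =====

-- the pair a length-2 row unpacks to
def pvToPair (row : List String) : String × String :=
  match row with
  | [key, item] => (key, item)
  | _ => ("", "")

-- inserting the empty list before appending is the same single dict update
lemma pvStep_eq (d : PySem.Dict String (List String)) (k it : String) :
    (if d.contains k then d else d.insert k []).modify k [] (fun xs => xs ++ [it])
      = d.modify k [] (fun xs => xs ++ [it]) := by
  by_cases h : d.contains k = true
  · simp [h]
  · simp only [h]
    simp [PySem.Dict.modify, PySem.Dict.insert_insert_self, PySem.Dict.getD_insert_self,
      PySem.Dict.getD_of_not_contains (d := d) (k := k) (d0 := ([] : List String))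
        (Bool.not_eq_true _ ▸ h)]

-- A's grouping loop over rows is the pair-shaped modify loop over the unpacked pairs
lemma pvFoldA_eq (ts : List (List String)) (d : PySem.Dict String (List String))
    (h : ∀ r ∈ ts, r.length = 2) :
    ts.foldl (fun d row =>
      match row with
      | [key, item] =>
          let d := if d.contains key then d else d.insert key []
          d.modify key [] (fun xs => xs ++ [item])
      | _ => d) d
      = (ts.map pvToPair).foldl (fun d p => d.modify p.1 [] (fun xs => xs ++ [p.2])) d := by
  induction ts generalizing d with
  | nil => rfl
  | cons r ts ih =>
    obtain ⟨a, b, rfl⟩ : ∃ a b, r = [a, b] := by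
      have := h r (List.mem_cons_self)
      match r, this with
      | [a, b], _ => exact ⟨a, b, rfl⟩
    simp only [List.foldl_cons, List.map_cons, pvToPair]
    rw [pvStep_eq]
    exact ih _ (fun r hr => h r (List.mem_cons_of_mem _ hr))

-- B's per-key comprehension collects exactly the items of the matching pairs, in order
lemma pvFilter_eq (ts : List (List String)) (k : String)
    (h : ∀ r ∈ ts, r.length = 2) :
    ts.filterMap (pvRowItemIf k)
      = ((ts.map pvToPair).filter (fun p => p.1 == k)).map (fun p => p.2) := by
  induction ts with
  | nil => rfl
  | cons r ts ih =>
    obtain ⟨a, b, rfl⟩ : ∃ a b, r = [a, b] := by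
      have := h r (List.mem_cons_self)
      match r, this with
      | [a, b], _ => exact ⟨a, b, rfl⟩
    have ih' := ih (fun r hr => h r (List.mem_cons_of_mem _ hr))
    have hh : pvRowItemIf k [a, b] = if a == k then some b else none := rfl
    rw [List.filterMap_cons, hh, List.map_cons, List.filter_cons]
    rcases Bool.eq_false_or_eq_true (a == k) with hk | hk <;>
      simp [pvToPair, hk, ih']

-- ===== VERDICT (by name: the statement is the Claim_ definition above) =====
theorem chanage_tickets_spec : Claim_equal_chanage_tickets := by
  intro tickets _ hpre
  show chanage_tickets tickets = chanage_tickets_alt tickets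
  show (tickets.foldl (fun d row =>
      match row with
      | [key, item] =>
          let d := if d.contains key then d else d.insert key []
          d.modify key [] (fun xs => xs ++ [item])
      | _ => d) PySem.Dict.empty).items.map
        (fun p => (p.1, PySem.List.sorted p.2 (fun x => x) false))
    = (PySem.List.dedup (tickets.map pvRowKey)).map (fun k =>
          (k, PySem.List.sorted (tickets.filterMap (pvRowItemIf k)) (fun x => x) false))
  rw [pvFoldA_eq tickets PySem.Dict.empty hpre]
  set l := tickets.map pvToPair with hl
  set D := l.foldl (fun d p => d.modify p.1 [] (fun xs => xs ++ [p.2])) PySem.Dict.empty with hD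
  have hkeys : D.keys = PySem.List.dedup (l.map (fun p => p.1)) := by
    rw [hD, PySem.Dict.keys_foldl_modify_key]
    simp [PySem.Set.update_nil_left]
  have hnodup : D.keys.Nodup := by
    rw [hkeys]; exact PySem.List.nodup_dedup _
  have hget : ∀ k, D.getD k [] = ((l.filter (fun p => p.1 == k)).map (fun p => p.2)) := by
    intro k
    rw [hD, PySem.Dict.getD_foldl_modify_append]
    simp
  have hkmap : tickets.map pvRowKey = l.map (fun p => p.1) := by
    rw [hl, List.map_map]
    refine List.map_congr_left ?_
    intro r hr
    obtain ⟨a, b, rfl⟩ : ∃ a b, r = [a, b] := by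
      have := hpre r hr
      match r, this with
      | [a, b], _ => exact ⟨a, b, rfl⟩
    rfl
  rw [PySem.Dict.items_eq_map_keys D hnodup ([] : List String), hkeys, hkmap]
  rw [List.map_map]
  refine List.map_congr_left ?_
  intro k _
  simp only [Function.comp]
  rw [hget k, pvFilter_eq tickets k hpre]
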